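-- pv_equiv track=rewrite | github.com/nightstaker/AISE | src/aise/skills/architect/functional_design.py | _build_layer_structure
-- ===== SOURCE A (Python) =====
-- from typing import Any
--
-- def _build_layer_structure(functions: list[dict[str, Any]]) -> dict[str, Any]:
--     """Build hierarchical layer structure."""
--     layers = {
--         "api_layer": {"services": [], "components": []},
--         "business_layer": {"services": [], "components": []},
--         "data_layer": {"components": []},
--         "integration_layer": {"components": []},
--     }
--
--     for fn in functions:
--         layer_key = f"{fn['layer']}_layer"
--         if layer_key in layers:
--             fn_type = fn["type"]
--             if fn_type == "service":
--                 layers[layer_key]["services"].append(fn["id"])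
--             else:
--                 layers[layer_key]["components"].append(fn["id"])
--
--     return layers
-- ===== SOURCE B (Python) =====
-- from typing import Any
--
-- def _build_layer_structure(functions: list[dict[str, Any]]) -> dict[str, Any]:
--     """Build hierarchical layer structure declaratively: one comprehension per bucket."""
--     return {
--         "api_layer": {
--             "services": [f["id"] for f in functions if f["layer"] == "api" and f["type"] == "service"],
--             "components": [f["id"] for f in functions if f["layer"] == "api" and f["type"] != "service"],
--         },
--         "business_layer": {
--             "services": [f["id"] for f in functions if f["layer"] == "business" and f["type"] == "service"],
--             "components": [f["id"] for f in functions if f["layer"] == "business" and f["type"] != "service"],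
--         },
--         "data_layer": {
--             "components": [f["id"] for f in functions if f["layer"] == "data"],
--         },
--         "integration_layer": {
--             "components": [f["id"] for f in functions if f["layer"] == "integration"],
--         },
--     }
-- ===== Notes on version B (the rewrite author's own statement) =====
-- stated objective: idiomatic
-- what changed: A fills a pre-built mutable dict in one imperative dispatch pass over functions; B builds the result as a single declarative literal whose buckets are independent per-bucket comprehensions filtering functions.
import Mathlib
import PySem

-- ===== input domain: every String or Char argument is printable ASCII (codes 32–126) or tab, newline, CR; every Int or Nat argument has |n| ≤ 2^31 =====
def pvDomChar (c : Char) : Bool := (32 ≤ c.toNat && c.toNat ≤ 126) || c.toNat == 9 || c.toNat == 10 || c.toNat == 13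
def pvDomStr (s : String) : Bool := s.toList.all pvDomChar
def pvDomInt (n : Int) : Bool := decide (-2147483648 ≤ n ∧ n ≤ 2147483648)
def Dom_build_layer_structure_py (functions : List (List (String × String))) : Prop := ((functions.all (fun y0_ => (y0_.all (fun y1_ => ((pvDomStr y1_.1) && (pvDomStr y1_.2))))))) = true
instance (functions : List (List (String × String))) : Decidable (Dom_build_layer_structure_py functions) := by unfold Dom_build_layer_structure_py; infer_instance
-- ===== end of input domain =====

-- B replaces A's single imperative dispatch pass into a pre-built mutable dict by a
-- declarative literal of independent per-bucket comprehensions (objective: idiomatic).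
-- Pre_ excludes exactly the inputs on which A raises KeyError.

-- ===== PORT A =====
-- Python dicts appear as assoc lists; alGet? is Python's d[k] (first match, none = KeyError),
-- alModify mutates the (unique) entry at k in place, as Python's append-through-lookup does.
def alGet? {β : Type} (d : List (String × β)) (k : String) : Option β :=
  match d with
  | [] => none
  | (k', v) :: rest => if k' = k then some v else alGet? rest k

def alModify {β : Type} (d : List (String × β)) (k : String) (f : β → β) : List (String × β) :=
  match d with
  | [] => []
  | (k', v) :: rest => if k' = k then (k', f v) :: rest else (k', v) :: alModify rest k f

-- the literal `layers` dict A starts from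
def initLayersA : List (String × List (String × List String)) :=
  [("api_layer", [("services", []), ("components", [])]),
   ("business_layer", [("services", []), ("components", [])]),
   ("data_layer", [("components", [])]),
   ("integration_layer", [("components", [])])]

-- one iteration of A's for-loop; the `none` fallthroughs are where Python raises KeyError
-- (excluded by Pre_), everything else is exact
def stepA (layers : List (String × List (String × List String))) (fn : List (String × String)) :
    List (String × List (String × List String)) :=
  match alGet? fn "layer" with
  | none => layers
  | some l =>
    let layer_key := l ++ "_layer"
    if (alGet? layers layer_key).isSome then
      match alGet? fn "type" with
      | none => layers
      | some fn_type =>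
        match alGet? fn "id" with
        | none => layers
        | some i =>
          if fn_type = "service" then
            alModify layers layer_key (fun inner => alModify inner "services" (fun xs => xs ++ [i]))
          else
            alModify layers layer_key (fun inner => alModify inner "components" (fun xs => xs ++ [i]))
    else layers

def build_layer_structure_py (functions : List (List (String × String))) :
    List (String × List (String × List String)) :=
  functions.foldl stepA initLayersA

-- ===== PORT B =====
-- each comprehension of Source B; the filterMap skips where Python would raise KeyError (outside Pre_)
def svcIds (L : String) (functions : List (List (String × String))) : List String :=
  functions.filterMap (fun f =>
    if alGet? f "layer" = some L ∧ alGet? f "type" = some "service" then alGet? f "id" else none)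

def compIds (L : String) (functions : List (List (String × String))) : List String :=
  functions.filterMap (fun f =>
    if alGet? f "layer" = some L ∧ ¬ alGet? f "type" = some "service" then alGet? f "id" else none)

def allIds (L : String) (functions : List (List (String × String))) : List String :=
  functions.filterMap (fun f =>
    if alGet? f "layer" = some L then alGet? f "id" else none)

def build_layer_structure_py_alt (functions : List (List (String × String))) :
    List (String × List (String × List String)) :=
  [("api_layer", [("services", svcIds "api" functions), ("components", compIds "api" functions)]),
   ("business_layer", [("services", svcIds "business" functions), ("components", compIds "business" functions)]),
   ("data_layer", [("components", allIds "data" functions)]),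
   ("integration_layer", [("components", allIds "integration" functions)])]

-- ===== PRECONDITION & SPEC =====
-- Pre_ excludes exactly the inputs on which A raises KeyError: a function without a "layer"
-- key; a function in one of the four layers without a "type" or "id" key; and a
-- "data"/"integration" function of type "service" (A looks up the absent "services" bucket).
def fnOK (fn : List (String × String)) : Bool :=
  match List.lookup "layer" fn with
  | none => false
  | some l =>
    if l = "api" ∨ l = "business" then
      (List.lookup "type" fn).isSome && (List.lookup "id" fn).isSome
    else if l = "data" ∨ l = "integration" then
      (List.lookup "type" fn).isSome && (List.lookup "id" fn).isSome
        && !(List.lookup "type" fn == some "service")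
    else true

def Pre_build_layer_structure_py (functions : List (List (String × String))) : Prop :=
  functions.all fnOK = true
instance (functions : List (List (String × String))) : Decidable (Pre_build_layer_structure_py functions) := by
  unfold Pre_build_layer_structure_py; infer_instance

def pvWitness_build_layer_structure_py : (List (List (String × String))) :=
  [[("layer", "api"), ("type", "service"), ("id", "f1")],
   [("layer", "data"), ("type", "store"), ("id", "f2")],
   [("layer", "other")]]

def Spec_build_layer_structure_py (functions : List (List (String × String))) (out : List (String × List (String × List String))) : Prop := out = build_layer_structure_py_alt functions
instance (functions : List (List (String × String))) (out : List (String × List (String × List String))) : Decidable (Spec_build_layer_structure_py functions out) := by unfold Spec_build_layer_structure_py; infer_instance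

-- ===== CLAIM (what is proved, stated in full; the proofs are below) =====
def Claim_equal_build_layer_structure_py : Prop := ∀ (functions : List (List (String × String))), Dom_build_layer_structure_py functions → Pre_build_layer_structure_py functions → Spec_build_layer_structure_py functions (build_layer_structure_py functions)

-- ===== LEMMAS AND PROOFS =====

theorem alGet?_eq_lookup {β : Type} (d : List (String × β)) (k : String) :
    alGet? d k = List.lookup k d := by
  induction d with
  | nil => rfl
  | cons p rest ih =>
    obtain ⟨k', v⟩ := p
    by_cases h : k' = k
    · subst h; simp [alGet?, List.lookup]
    · have h' : (k == k') = false := by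
        simp only [beq_eq_false_iff_ne, ne_eq]; exact fun e => h e.symm
      simp [alGet?, List.lookup, h, h', ih]

theorem layer_inj (l m : String) : l ++ "_layer" = m ++ "_layer" ↔ l = m := by
  constructor
  · intro h
    have h2 := congrArg String.toList h
    simp [String.toList_append] at h2
    exact String.toList_inj.mp h2
  · intro h; rw [h]

theorem fold_state (fns : List (List (String × String))) (h : fns.all fnOK = true)
    (as ac bs bc dc ic : List String) :
    fns.foldl stepA
      [("api_layer", [("services", as), ("components", ac)]),
       ("business_layer", [("services", bs), ("components", bc)]),
       ("data_layer", [("components", dc)]),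
       ("integration_layer", [("components", ic)])] =
      [("api_layer", [("services", as ++ svcIds "api" fns), ("components", ac ++ compIds "api" fns)]),
       ("business_layer", [("services", bs ++ svcIds "business" fns), ("components", bc ++ compIds "business" fns)]),
       ("data_layer", [("components", dc ++ allIds "data" fns)]),
       ("integration_layer", [("components", ic ++ allIds "integration" fns)])] := by
  revert h
  induction fns generalizing as ac bs bc dc ic with
  | nil => intro _; simp [svcIds, compIds, allIds]
  | cons f fns ih =>
    intro h
    rw [List.all_cons, Bool.and_eq_true] at h
    obtain ⟨hf, hfs⟩ := h
    unfold fnOK at hf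
    simp only [← alGet?_eq_lookup] at hf
    cases hl : alGet? f "layer" with
    | none => rw [hl] at hf; simp at hf
    | some l =>
      rw [hl] at hf
      by_cases h1 : l = "api"
      · subst h1
        simp [Option.isSome_iff_exists] at hf
        obtain ⟨⟨t, ht⟩, ⟨i, hi⟩⟩ := hf
        by_cases hts : t = "service"
        · subst hts
          rw [List.foldl_cons]
          simp [stepA, hl, ht, hi, alGet?, alModify]
          rw [ih (as ++ [i]) ac bs bc dc ic hfs]
          simp [svcIds, compIds, allIds, hl, ht, hi]
        · rw [List.foldl_cons]
          simp [stepA, hl, ht, hi, hts, alGet?, alModify]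
          rw [ih as (ac ++ [i]) bs bc dc ic hfs]
          simp [svcIds, compIds, allIds, hl, ht, hi, hts]
      · by_cases h2 : l = "business"
        · subst h2
          simp [Option.isSome_iff_exists] at hf
          obtain ⟨⟨t, ht⟩, ⟨i, hi⟩⟩ := hf
          by_cases hts : t = "service"
          · subst hts
            rw [List.foldl_cons]
            simp [stepA, hl, ht, hi, alGet?, alModify]
            rw [ih as ac (bs ++ [i]) bc dc ic hfs]
            simp [svcIds, compIds, allIds, hl, ht, hi]
          · rw [List.foldl_cons]
            simp [stepA, hl, ht, hi, hts, alGet?, alModify]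
            rw [ih as ac bs (bc ++ [i]) dc ic hfs]
            simp [svcIds, compIds, allIds, hl, ht, hi, hts]
        · by_cases h3 : l = "data"
          · subst h3
            simp [Option.isSome_iff_exists] at hf
            obtain ⟨⟨⟨t, ht⟩, ⟨i, hi⟩⟩, hneq⟩ := hf
            rw [ht] at hneq
            simp only [Option.some.injEq] at hneq
            rw [List.foldl_cons]
            simp [stepA, hl, ht, hi, hneq, alGet?, alModify]
            rw [ih as ac bs bc (dc ++ [i]) ic hfs]
            simp [svcIds, compIds, allIds, hl, ht, hi, hneq]
          · by_cases h4 : l = "integration"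
            · subst h4
              simp [Option.isSome_iff_exists] at hf
              obtain ⟨⟨⟨t, ht⟩, ⟨i, hi⟩⟩, hneq⟩ := hf
              rw [ht] at hneq
              simp only [Option.some.injEq] at hneq
              rw [List.foldl_cons]
              simp [stepA, hl, ht, hi, hneq, alGet?, alModify]
              rw [ih as ac bs bc dc (ic ++ [i]) hfs]
              simp [svcIds, compIds, allIds, hl, ht, hi, hneq]
            · have hapi : ¬ (("api_layer" : String) = l ++ "_layer") :=
                fun hc => h1 ((layer_inj "api" l).mp hc).symm
              have hbus : ¬ (("business_layer" : String) = l ++ "_layer") :=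
                fun hc => h2 ((layer_inj "business" l).mp hc).symm
              have hdat : ¬ (("data_layer" : String) = l ++ "_layer") :=
                fun hc => h3 ((layer_inj "data" l).mp hc).symm
              have hint : ¬ (("integration_layer" : String) = l ++ "_layer") :=
                fun hc => h4 ((layer_inj "integration" l).mp hc).symm
              rw [List.foldl_cons]
              simp [stepA, hl, alGet?, hapi, hbus, hdat, hint]
              rw [ih as ac bs bc dc ic hfs]
              simp [svcIds, compIds, allIds, hl, h1, h2, h3, h4]

-- ===== VERDICT (by name: the statement is the Claim_ definition above) =====
theorem build_layer_structure_py_spec : Claim_equal_build_layer_structure_py := by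
  intro functions _ hpre
  show build_layer_structure_py functions = build_layer_structure_py_alt functions
  simpa [build_layer_structure_py, initLayersA, build_layer_structure_py_alt] using
    fold_state functions hpre [] [] [] [] [] []
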